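-- pv_equiv track=rewrite | github.com/sxzcy/ha-daikin-d611 | custom_components/daikin_d611/cloud.py | calculate_cert_password
-- ===== SOURCE A (Python) =====
-- def calculate_cert_password(push_id: str) -> str:
--     checksum = 0
--     for byte in push_id.encode("utf-8"):
--         checksum ^= byte
--         for _ in range(8):
--             if checksum & 1:
--                 checksum ^= 67601
--             checksum = int(checksum) // 2
--     return f"{checksum & 0xffff:04X}"
-- ===== SOURCE B (Python) =====
-- # Table-driven CRC (one lookup per byte instead of A's 8-round bit loop),
-- # a single-lookup-per-byte pass, and the hex string assembled digit by digit.
-- _TABLE = []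
-- for _i in range(256):
--     _c = _i
--     for _ in range(8):
--         _c = (_c ^ 67601) >> 1 if _c & 1 else _c >> 1
--     _TABLE.append(_c)
--
-- _HEX = "0123456789ABCDEF"
--
-- def _go(bs, c):
--     for b in bs:
--         c = (c >> 8) ^ _TABLE[(c ^ b) & 0xFF]
--     return c
--
-- def calculate_cert_password(push_id: str) -> str:
--     c = _go(list(push_id.encode("utf-8")), 0) & 0xFFFF
--     out = ""
--     for _ in range(4):
--         out = _HEX[c & 15] + out
--         c >>= 4
--     return out
-- ===== Notes on version B (the rewrite author's own statement) =====
-- stated objective: faster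
-- what changed: Replaces the per-byte 8-iteration bit loop with a precomputed 256-entry CRC table consumed by a single-lookup-per-byte helper pass, and builds the 4-digit hex string digit by digit instead of an f-string.
import Mathlib
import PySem

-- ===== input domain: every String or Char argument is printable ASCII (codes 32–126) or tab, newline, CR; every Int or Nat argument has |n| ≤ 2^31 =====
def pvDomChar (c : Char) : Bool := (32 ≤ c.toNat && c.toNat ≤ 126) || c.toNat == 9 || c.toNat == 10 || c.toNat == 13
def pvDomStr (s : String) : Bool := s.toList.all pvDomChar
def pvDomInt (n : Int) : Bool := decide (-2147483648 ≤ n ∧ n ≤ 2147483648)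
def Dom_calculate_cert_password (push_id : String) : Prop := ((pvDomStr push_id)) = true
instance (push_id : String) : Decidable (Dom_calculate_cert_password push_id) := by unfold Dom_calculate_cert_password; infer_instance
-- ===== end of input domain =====

-- B replaces A's per-byte 8-round bit loop by a precomputed 256-entry CRC table,
-- a recursive one-lookup-per-byte pass, and digit-by-digit hex assembly: faster (constant factor).

-- ===== PORT A =====
-- push_id.encode("utf-8"): exact on the ASCII domain, each char is one byte = its code
def pvBytes (s : String) : List Nat := s.toList.map Char.toNat
-- f"{n:04X}" for n < 2^16: exactly four uppercase hex digits
def pvHexDigit (n : Nat) : Char := if n < 10 then Char.ofNat (48 + n) else Char.ofNat (55 + n)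
def pvHex4 (n : Nat) : String :=
  String.ofList [pvHexDigit ((n >>> 12) &&& 15), pvHexDigit ((n >>> 8) &&& 15),
             pvHexDigit ((n >>> 4) &&& 15), pvHexDigit (n &&& 15)]
-- one iteration of the inner `for _ in range(8)` body (checksum stays ≥ 0, so Nat; // 2 = / 2)
def pvRound (c : Nat) : Nat := (if c &&& 1 = 1 then c ^^^ 67601 else c) / 2

def calculate_cert_password (push_id : String) : String :=
  let checksum := (pvBytes push_id).foldl
    (fun checksum byte => (List.range 8).foldl (fun c _ => pvRound c) (checksum ^^^ byte)) 0
  pvHex4 (checksum &&& 0xffff)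

-- ===== PORT B =====
-- `_c = (_c ^ 67601) >> 1 if _c & 1 else _c >> 1`
def altRound (c : Nat) : Nat := if c &&& 1 = 1 then (c ^^^ 67601) >>> 1 else c >>> 1
-- the module-level table-building loop: 8 rounds from each start value
def altRounds : Nat → Nat → Nat
  | 0, c => c
  | k + 1, c => altRounds k (altRound c)
def altTable : List Nat := (List.range 256).map (fun i => altRounds 8 i)
-- _go: the per-byte loop, one table lookup per byte (index is masked & 0xFF, always in range)
def altGo : List Nat → Nat → Nat
  | [], c => c
  | b :: bs, c => altGo bs ((c >>> 8) ^^^ altTable.getD ((c ^^^ b) &&& 0xFF) 0)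
-- the hex-assembly loop: out = _HEX[c & 15] + out; c >>= 4, four times (string as its char list)
def altHexChars : List Char := "0123456789ABCDEF".toList
def altHexLoop : Nat → Nat → List Char → List Char
  | 0, _, out => out
  | k + 1, c, out => altHexLoop k (c >>> 4) (altHexChars.getD (c &&& 15) '0' :: out)

def calculate_cert_password_alt (push_id : String) : String :=
  let c := altGo (push_id.toList.map Char.toNat) 0 &&& 0xffff
  String.ofList (altHexLoop 4 c [])

-- ===== PRECONDITION & SPEC =====
def Spec_calculate_cert_password (push_id : String) (out : String) : Prop := out = calculate_cert_password_alt push_id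
instance (push_id : String) (out : String) : Decidable (Spec_calculate_cert_password push_id out) := by unfold Spec_calculate_cert_password; infer_instance

-- ===== CLAIM (what is proved, stated in full; the proofs are below) =====
def Claim_equal_calculate_cert_password : Prop := ∀ (push_id : String), Dom_calculate_cert_password push_id → Spec_calculate_cert_password push_id (calculate_cert_password push_id)

-- ===== LEMMAS AND PROOFS =====

-- the eight rounds written out
def pvF (i : Nat) : Nat :=
  pvRound (pvRound (pvRound (pvRound (pvRound (pvRound (pvRound (pvRound i)))))))

lemma altRound_eq (c : Nat) : altRound c = pvRound c := by
  unfold altRound pvRound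
  split <;> simp [Nat.shiftRight_succ, Nat.shiftRight_zero]

lemma altRounds_eq (i : Nat) : altRounds 8 i = pvF i := by
  simp [altRounds, altRound_eq, pvF]

lemma rounds_eq (i : Nat) : (List.range 8).foldl (fun c _ => pvRound c) i = pvF i := by
  have h : List.range 8 = [0, 1, 2, 3, 4, 5, 6, 7] := by rfl
  simp [h, List.foldl, pvF]

-- the round function is GF(2)-linear
lemma round_xor (x y : Nat) : pvRound (x ^^^ y) = pvRound x ^^^ pvRound y := by
  unfold pvRound
  have hx : (x ^^^ y) &&& 1 = (x &&& 1) ^^^ (y &&& 1) := Nat.and_xor_distrib_right ..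
  have h1 : ∀ n : Nat, n &&& 1 = 0 ∨ n &&& 1 = 1 := by
    intro n; rw [Nat.and_one_is_mod]; omega
  have hdiv : ∀ a b : Nat, (a ^^^ b) / 2 = a / 2 ^^^ b / 2 := by
    intro a b
    have h : (a ^^^ b) >>> 1 = a >>> 1 ^^^ b >>> 1 := Nat.shiftRight_xor_distrib
    simpa [Nat.shiftRight_succ, Nat.shiftRight_zero] using h
  rcases h1 x with hx1 | hx1 <;> rcases h1 y with hy1 | hy1 <;>
    simp [hx, hx1, hy1, hdiv, Nat.xor_assoc, Nat.xor_comm, Nat.xor_left_comm]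

lemma F_xor (x y : Nat) : pvF (x ^^^ y) = pvF x ^^^ pvF y := by
  simp [pvF, round_xor]

lemma round_shift (x n : Nat) : pvRound (x <<< (n + 1)) = x <<< n := by
  unfold pvRound
  have he : x <<< (n + 1) = (x <<< n) * 2 := by
    simp [Nat.shiftLeft_eq, pow_succ, Nat.mul_assoc]
  rw [he, Nat.and_one_is_mod]
  simp

lemma F_shift (x : Nat) : pvF (x <<< 8) = x := by
  simp only [pvF]
  rw [show x <<< 8 = x <<< (7 + 1) from rfl, round_shift,
      show x <<< 7 = x <<< (6 + 1) from rfl, round_shift,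
      show x <<< 6 = x <<< (5 + 1) from rfl, round_shift,
      show x <<< 5 = x <<< (4 + 1) from rfl, round_shift,
      show x <<< 4 = x <<< (3 + 1) from rfl, round_shift,
      show x <<< 3 = x <<< (2 + 1) from rfl, round_shift,
      show x <<< 2 = x <<< (1 + 1) from rfl, round_shift,
      show x <<< 1 = x <<< (0 + 1) from rfl, round_shift, Nat.shiftLeft_zero]

lemma decomp (d : Nat) : d = ((d >>> 8) <<< 8) ^^^ (d &&& 255) := by
  apply Nat.eq_of_testBit_eq
  intro i
  have h255 : (255 : Nat) = 2 ^ 8 - 1 := by norm_num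
  rw [h255]
  simp only [Nat.testBit_xor, Nat.testBit_shiftLeft, Nat.testBit_shiftRight, Nat.testBit_and,
        Nat.testBit_two_pow_sub_one]
  by_cases h : 8 ≤ i
  · simp [h, Nat.not_lt.mpr h, Nat.add_sub_cancel' h]
  · simp [h, Nat.lt_of_not_le h]

lemma F_decomp (d : Nat) : pvF d = (d >>> 8) ^^^ pvF (d &&& 255) := by
  conv_lhs => rw [decomp d]
  rw [F_xor, F_shift]

lemma table_lookup (i : Nat) (h : i < 256) : altTable.getD i 0 = pvF i := by
  simp [altTable, List.getD_eq_getElem?_getD, h, altRounds_eq]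

lemma step_eq (c b : Nat) (hb : b < 256) :
    (List.range 8).foldl (fun c _ => pvRound c) (c ^^^ b)
      = (c >>> 8) ^^^ altTable.getD ((c ^^^ b) &&& 0xFF) 0 := by
  have hidx : (c ^^^ b) &&& 0xFF < 256 := by
    have h := Nat.and_le_right (n := c ^^^ b) (m := 0xFF); omega
  rw [rounds_eq, table_lookup _ hidx, F_decomp]
  have hbs : b >>> 8 = 0 := by
    rw [Nat.shiftRight_eq_div_pow]; exact Nat.div_eq_of_lt (by omega)
  rw [Nat.shiftRight_xor_distrib, hbs, Nat.xor_zero]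

lemma go_eq (bs : List Nat) (c : Nat) (hbs : ∀ b ∈ bs, b < 256) :
    altGo bs c = bs.foldl (fun checksum byte =>
        (List.range 8).foldl (fun c _ => pvRound c) (checksum ^^^ byte)) c := by
  induction bs generalizing c with
  | nil => rfl
  | cons b bs ih =>
      simp only [altGo, List.foldl_cons]
      rw [ih _ (fun x hx => hbs x (List.mem_cons_of_mem _ hx)),
          step_eq c b (hbs b (List.mem_cons_self ..))]

lemma digit_eq (k : Nat) (h : k < 16) : altHexChars.getD k '0' = pvHexDigit k := by
  interval_cases k <;> rfl

lemma hex_eq (m : Nat) : String.ofList (altHexLoop 4 m []) = pvHex4 m := by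
  have h4 : ∀ x : Nat, x &&& 15 < 16 := fun x =>
    Nat.lt_succ_of_le (Nat.and_le_right)
  simp only [altHexLoop, pvHex4]
  rw [digit_eq _ (h4 _), digit_eq _ (h4 _), digit_eq _ (h4 _), digit_eq _ (h4 _),
    ← Nat.shiftRight_add, ← Nat.shiftRight_add, ← Nat.shiftRight_add]

-- ===== VERDICT (by name: the statement is the Claim_ definition above) =====
theorem calculate_cert_password_spec : Claim_equal_calculate_cert_password := by
  intro s hdom
  unfold Spec_calculate_cert_password calculate_cert_password calculate_cert_password_alt
  have hb : ∀ b ∈ s.toList.map Char.toNat, b < 256 := by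
    intro b hb
    rcases List.mem_map.mp hb with ⟨ch, hch, rfl⟩
    have := List.all_eq_true.mp hdom ch hch
    simp only [pvDomChar, Bool.or_eq_true, Bool.and_eq_true, decide_eq_true_eq, beq_iff_eq]
      at this
    omega
  rw [hex_eq, go_eq _ _ hb, pvBytes]
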